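-- pv_equiv track=rewrite | github.com/MaxyMoos/aoc-23 | src/bin/13-2/main.py | process_pattern
-- ===== SOURCE A (Python) =====
-- def transpose_pattern(pattern):
--     transposed = []
--     for i in range(len(pattern[0])):
--         transposed.append(''.join([l[i] for l in pattern]))
--     return transposed
--
-- def get_line_sym(pattern):
--     sym = []
--     for i in range(1, len(pattern)):
--         if pattern[i] == pattern[i-1]:
--             sym.append(i)
--     return sym
--
-- def is_perfect(pattern, sym_index):
--     n = sym_index
--     offset = 1
--     while n + offset < len(pattern) and n-offset-1 >= 0 and pattern[n+offset] == pattern[n-offset-1]: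
--         offset += 1
--     return n + offset == len(pattern) or n - offset - 1 < 0
--
-- def process_pattern(pattern, exclude_hsyms=None, exclude_vsyms=None):
--     htotal, vtotal = 0, 0
--
--     hsyms = get_line_sym(pattern)
--     tpattern = transpose_pattern(pattern)
--     vsyms = get_line_sym(tpattern)
--
--     perfect_hsyms = list(filter(lambda a: is_perfect(pattern, a), hsyms))
--     perfect_vsyms = list(filter(lambda a: is_perfect(tpattern, a), vsyms))
--
--     if exclude_hsyms is not None:
--         perfect_hsyms = [item for item in perfect_hsyms if item not in exclude_hsyms]
--     if exclude_vsyms is not None: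
--         perfect_vsyms = [item for item in perfect_vsyms if item not in exclude_vsyms]
--
--     if len(perfect_hsyms) == 1:
--         htotal += perfect_hsyms[0]
--     elif len(perfect_vsyms) == 1:
--         vtotal += perfect_vsyms[0]
--
--     return htotal, vtotal
-- ===== SOURCE B (Python) =====
-- def process_pattern(pattern, exclude_hsyms=None, exclude_vsyms=None):
--     tpattern = [''.join(row[i] for row in pattern) for i in range(len(pattern[0]))]
--
--     def perfect_syms(grid):
--         return [i for i in range(1, len(grid))
--                 if all(a == b for a, b in zip(reversed(grid[:i]), grid[i:]))]
--
--     perfect_hsyms = perfect_syms(pattern)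
--     perfect_vsyms = perfect_syms(tpattern)
--     if exclude_hsyms is not None:
--         perfect_hsyms = [i for i in perfect_hsyms if i not in exclude_hsyms]
--     if exclude_vsyms is not None:
--         perfect_vsyms = [i for i in perfect_vsyms if i not in exclude_vsyms]
--     if len(perfect_hsyms) == 1:
--         return perfect_hsyms[0], 0
--     if len(perfect_vsyms) == 1:
--         return 0, perfect_vsyms[0]
--     return 0, 0
-- ===== Notes on version B (the rewrite author's own statement) =====
-- stated objective: simpler
-- what changed: A's two-stage symmetry search (collect adjacent-equal candidate lines, then expand each outward with a while-loop) is replaced by one direct reflected-prefix comparison per split index (zip of reversed(grid[:i]) with grid[i:]); the transpose and the exclude/selection tail are kept.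
import Mathlib
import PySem

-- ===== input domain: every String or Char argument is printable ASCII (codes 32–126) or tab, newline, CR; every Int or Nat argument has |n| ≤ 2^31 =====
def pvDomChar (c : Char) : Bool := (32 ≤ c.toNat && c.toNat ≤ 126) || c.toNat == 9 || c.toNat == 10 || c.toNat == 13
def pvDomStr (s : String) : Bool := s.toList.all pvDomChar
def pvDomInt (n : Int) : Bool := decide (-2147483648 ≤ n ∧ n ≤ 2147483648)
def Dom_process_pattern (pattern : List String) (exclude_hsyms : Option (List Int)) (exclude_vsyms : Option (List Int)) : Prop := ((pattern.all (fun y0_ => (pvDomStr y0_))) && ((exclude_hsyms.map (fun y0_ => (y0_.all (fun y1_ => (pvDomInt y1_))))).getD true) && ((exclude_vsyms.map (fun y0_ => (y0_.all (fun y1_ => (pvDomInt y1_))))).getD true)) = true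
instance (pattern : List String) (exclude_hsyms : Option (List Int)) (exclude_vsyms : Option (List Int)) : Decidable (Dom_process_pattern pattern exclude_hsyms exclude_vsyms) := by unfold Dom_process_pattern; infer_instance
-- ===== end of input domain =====

-- B replaces A's two-stage candidate-then-expand symmetry search by one direct reflected-prefix
-- comparison per split index (objective: simpler); return values agree on all of Pre_.

-- ===== PORT A =====
-- rows are handled as lists of characters (String equality coincides with toList equality)
def pvRow (g : List (List Char)) (i : Int) : List Char :=
  PySem.List.pyGetD g i []

def transpose_pattern (pattern : List (List Char)) : List (List Char) :=
  (PySem.List.pyRange 0 ((pattern.headD []).length) 1).foldl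
    (fun acc i => acc ++ [pattern.map (fun l => PySem.List.pyGetD l i ' ')]) []

def get_line_sym (g : List (List Char)) : List Int :=
  (PySem.List.pyRange 1 g.length 1).foldl
    (fun sym i => if pvRow g i = pvRow g (i - 1) then sym ++ [i] else sym) []

def is_perfect_loop (g : List (List Char)) (n : Int) (offset : Int) : Int :=
  if h : n + offset < g.length ∧ 0 ≤ n - offset - 1 ∧ pvRow g (n + offset) = pvRow g (n - offset - 1)
  then is_perfect_loop g n (offset + 1)
  else offset
termination_by ((g.length : Int) - (n + offset)).toNat
decreasing_by omega

def is_perfect (g : List (List Char)) (sym_index : Int) : Bool :=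
  let offset := is_perfect_loop g sym_index 1
  decide (sym_index + offset = g.length) || decide (sym_index - offset - 1 < 0)

def process_pattern (pattern : List String) (exclude_hsyms : Option (List Int)) (exclude_vsyms : Option (List Int)) : Int × Int :=
  let g := pattern.map String.toList
  let hsyms := get_line_sym g
  let tg := transpose_pattern g
  let vsyms := get_line_sym tg
  let perfect_hsyms := hsyms.filter (fun a => is_perfect g a)
  let perfect_vsyms := vsyms.filter (fun a => is_perfect tg a)
  let perfect_hsyms := match exclude_hsyms with
    | none => perfect_hsyms
    | some ex => perfect_hsyms.filter (fun item => !(ex.contains item))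
  let perfect_vsyms := match exclude_vsyms with
    | none => perfect_vsyms
    | some ex => perfect_vsyms.filter (fun item => !(ex.contains item))
  if perfect_hsyms.length = 1 then ((0 : Int) + PySem.List.pyGetD perfect_hsyms 0 0, 0)
  else if perfect_vsyms.length = 1 then (0, (0 : Int) + PySem.List.pyGetD perfect_vsyms 0 0)
  else (0, 0)

-- ===== PORT B =====
def pvTransposeB (pattern : List (List Char)) : List (List Char) :=
  (PySem.List.pyRange 0 ((pattern.headD []).length) 1).map
    (fun i => pattern.map (fun row => PySem.List.pyGetD row i ' '))

def perfect_syms (g : List (List Char)) : List Int :=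
  (PySem.List.pyRange 1 g.length 1).filter
    (fun i => ((PySem.List.slice g none (some i)).reverse.zip (PySem.List.slice g (some i) none)).all
        (fun p => decide (p.1 = p.2)))

def process_pattern_alt (pattern : List String) (exclude_hsyms : Option (List Int)) (exclude_vsyms : Option (List Int)) : Int × Int :=
  let g := pattern.map String.toList
  let tpattern := pvTransposeB g
  let perfect_hsyms := perfect_syms g
  let perfect_vsyms := perfect_syms tpattern
  let perfect_hsyms := match exclude_hsyms with
    | none => perfect_hsyms
    | some ex => perfect_hsyms.filter (fun i => !(ex.contains i))
  let perfect_vsyms := match exclude_vsyms with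
    | none => perfect_vsyms
    | some ex => perfect_vsyms.filter (fun i => !(ex.contains i))
  if perfect_hsyms.length = 1 then (PySem.List.pyGetD perfect_hsyms 0 0, 0)
  else if perfect_vsyms.length = 1 then (0, PySem.List.pyGetD perfect_vsyms 0 0)
  else (0, 0)

-- ===== PRECONDITION & SPEC =====
-- Pre_ excludes exactly the inputs where Python A raises IndexError: the empty pattern
-- (pattern[0]) and patterns with a row shorter than the first row (l[i] during transpose).
def Pre_process_pattern (pattern : List String) (exclude_hsyms : Option (List Int)) (exclude_vsyms : Option (List Int)) : Prop :=
  pattern ≠ [] ∧ ∀ s ∈ pattern, (pattern.headD "").toList.length ≤ s.toList.length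
instance (pattern : List String) (exclude_hsyms : Option (List Int)) (exclude_vsyms : Option (List Int)) : Decidable (Pre_process_pattern pattern exclude_hsyms exclude_vsyms) := by unfold Pre_process_pattern; infer_instance

def pvWitness_process_pattern : List String × Option (List Int) × Option (List Int) :=
  (["#..", "#..", "##."], none, some [2])

def Spec_process_pattern (pattern : List String) (exclude_hsyms : Option (List Int)) (exclude_vsyms : Option (List Int)) (out : Int × Int) : Prop := out = process_pattern_alt pattern exclude_hsyms exclude_vsyms
instance (pattern : List String) (exclude_hsyms : Option (List Int)) (exclude_vsyms : Option (List Int)) (out : Int × Int) : Decidable (Spec_process_pattern pattern exclude_hsyms exclude_vsyms out) := by unfold Spec_process_pattern; infer_instance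

-- ===== CLAIM (what is proved, stated in full; the proofs are below) =====
def Claim_equal_process_pattern : Prop := ∀ (pattern : List String) (exclude_hsyms : Option (List Int)) (exclude_vsyms : Option (List Int)), Dom_process_pattern pattern exclude_hsyms exclude_vsyms → Pre_process_pattern pattern exclude_hsyms exclude_vsyms → Spec_process_pattern pattern exclude_hsyms exclude_vsyms (process_pattern pattern exclude_hsyms exclude_vsyms)

-- ===== LEMMAS AND PROOFS =====

theorem transpose_eq (pattern : List (List Char)) : transpose_pattern pattern = pvTransposeB pattern := by
  rw [transpose_pattern, pvTransposeB, PySem.List.foldl_append_singleton_eq_map]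
  simp

-- e g n k: the loop guard of is_perfect_loop at offset k
def pvE (g : List (List Char)) (n k : Int) : Prop :=
  n + k < g.length ∧ 0 ≤ n - k - 1 ∧ pvRow g (n + k) = pvRow g (n - k - 1)

theorem loop_spec (g : List (List Char)) (n : Int) : ∀ offset : Int,
    offset ≤ is_perfect_loop g n offset ∧ ¬ pvE g n (is_perfect_loop g n offset) ∧
    ∀ k, offset ≤ k → k < is_perfect_loop g n offset → pvE g n k := by
  intro off
  induction off using is_perfect_loop.induct g n with
  | case1 off h ih =>
    rw [is_perfect_loop, dif_pos h]
    refine ⟨by omega, ih.2.1, fun k hk1 hk2 => ?_⟩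
    rcases eq_or_lt_of_le hk1 with rfl | hlt
    · exact h
    · exact ih.2.2 k (by omega) hk2
  | case2 off h =>
    rw [is_perfect_loop, dif_neg h]
    exact ⟨le_refl _, h, fun k hk1 hk2 => absurd hk1 (by omega)⟩

-- A's candidate + expansion ⟺ full mirror over the overlap
theorem key (g : List (List Char)) (j : Nat) (hj1 : 1 ≤ j) (hj2 : j < g.length) :
    ((pvRow g (j : Int) = pvRow g ((j : Int) - 1)) ∧ is_perfect g (j : Int) = true)
      ↔ (∀ k : Nat, k < min j (g.length - j) → g.getD (j + k) [] = g.getD (j - 1 - k) []) := by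
  have hrow : ∀ i : Int, 0 ≤ i → i < g.length → pvRow g i = g.getD i.toNat [] := by
    intro i h0 hl
    rw [pvRow, PySem.List.pyGetD_eq_getElem g [] h0 (by exact_mod_cast hl),
      List.getD_eq_getElem g [] (show i.toNat < g.length by omega)]
  set m : Nat := min j (g.length - j) with hm
  have hm1 : 1 ≤ m := by omega
  have hEiff : ∀ k : Nat, k < m →
      (pvE g (j : Int) (k : Int) ↔ g.getD (j + k) [] = g.getD (j - 1 - k) []) := by
    intro k hk
    constructor
    · rintro ⟨-, -, heq⟩
      rw [hrow _ (by omega) (by omega), hrow _ (by omega) (by omega)] at heq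
      have e1 : ((j : Int) + k).toNat = j + k := by omega
      have e2 : ((j : Int) - k - 1).toNat = j - 1 - k := by omega
      rwa [e1, e2] at heq
    · intro heq
      refine ⟨by omega, by omega, ?_⟩
      rw [hrow _ (by omega) (by omega), hrow _ (by omega) (by omega)]
      have e1 : ((j : Int) + k).toNat = j + k := by omega
      have e2 : ((j : Int) - k - 1).toNat = j - 1 - k := by omega
      rw [e1, e2]; exact heq
  have hnotEm : ¬ pvE g (j : Int) (m : Int) := by
    rintro ⟨h1, h2, -⟩; omega
  obtain ⟨hle, hstop, hall⟩ := loop_spec g (j : Int) 1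
  set r := is_perfect_loop g (j : Int) 1 with hr
  constructor
  · rintro ⟨hcand, hperf⟩
    have hmr : (m : Int) ≤ r := by
      simp only [is_perfect, ← hr, Bool.or_eq_true, decide_eq_true_eq] at hperf
      rcases hperf with h | h <;> omega
    intro k hk
    rcases Nat.eq_zero_or_pos k with rfl | hkpos
    · have heq := hcand
      rw [hrow _ (by omega) (by omega), hrow _ (by omega) (by omega)] at heq
      have e1 : ((j : Int)).toNat = j + 0 := by omega
      have e2 : ((j : Int) - 1).toNat = j - 1 - 0 := by omega
      rwa [e1, e2] at heq
    · exact (hEiff k hk).mp (hall (k : Int) (by omega) (by omega))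
  · intro hmir
    have hcand : pvRow g (j : Int) = pvRow g ((j : Int) - 1) := by
      have heq := hmir 0 (by omega)
      rw [hrow _ (by omega) (by omega), hrow _ (by omega) (by omega)]
      have e1 : ((j : Int)).toNat = j + 0 := by omega
      have e2 : ((j : Int) - 1).toNat = j - 1 - 0 := by omega
      rw [e1, e2]; exact heq
    have hrm : r = (m : Int) := by
      by_contra hne
      rcases lt_or_gt_of_ne hne with hlt | hgt
      · have hrge0 : (1 : Int) ≤ r := hle
        have : pvE g (j : Int) r := by
          have : r = ((r.toNat : Nat) : Int) := by omega
          rw [this]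
          exact (hEiff r.toNat (by omega)).mpr (hmir r.toNat (by omega))
        exact hstop this
      · exact hnotEm (hall (m : Int) (by omega) hgt)
    refine ⟨hcand, ?_⟩
    simp only [is_perfect, ← hr, hrm, Bool.or_eq_true, decide_eq_true_eq]
    omega

-- B's reflected-prefix comparison ⟺ the same mirror condition
theorem beq_iff (g : List (List Char)) (j : Nat) (hj1 : 1 ≤ j) (hj2 : j < g.length) :
    (((PySem.List.slice g none (some (j : Int))).reverse.zip (PySem.List.slice g (some (j : Int)) none)).all
        (fun p => decide (p.1 = p.2)) = true)
      ↔ (∀ k : Nat, k < min j (g.length - j) → g.getD (j + k) [] = g.getD (j - 1 - k) []) := by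
  rw [PySem.List.slice_to_natCast, PySem.List.slice_from_natCast]
  rw [List.all_eq_true]
  constructor
  · intro h k hk
    have hk1 : k < (g.take j).reverse.length := by simp; omega
    have hk2 : k < (g.drop j).length := by simp; omega
    have hmem : ((g.take j).reverse[k], (g.drop j)[k]) ∈ (g.take j).reverse.zip (g.drop j) := by
      have := List.getElem_zip (l := (g.take j).reverse) (l' := g.drop j) (i := k)
        (h := by simp; omega)
      exact this ▸ List.getElem_mem _
    have := h _ hmem
    simp only [decide_eq_true_eq] at this
    have e1 : (g.take j).reverse[k] = g[j - 1 - k]'(by omega) := by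
      rw [List.getElem_reverse]
      rw [List.getElem_take]
      congr 1; simp; omega
    have e2 : (g.drop j)[k] = g[j + k]'(by omega) := by
      rw [List.getElem_drop]
    rw [e1, e2] at this
    rw [List.getD_eq_getElem g [] (show j + k < g.length by omega),
        List.getD_eq_getElem g [] (show j - 1 - k < g.length by omega)]
    exact this.symm
  · intro h p hp
    obtain ⟨k, hk, hpk⟩ := List.mem_iff_getElem.mp hp
    have hklt : k < min j (g.length - j) := by
      simp [List.length_zip] at hk; simp; omega
    have := h k hklt
    rw [List.getD_eq_getElem g [] (show j + k < g.length by omega),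
        List.getD_eq_getElem g [] (show j - 1 - k < g.length by omega)] at this
    rw [← hpk]
    have hzip := List.getElem_zip (l := (g.take j).reverse) (l' := g.drop j) (i := k) (h := hk)
    rw [hzip]
    simp only [decide_eq_true_eq]
    have e1 : (g.take j).reverse[k]'(by simp [List.length_zip] at hk ⊢; omega) = g[j - 1 - k]'(by omega) := by
      rw [List.getElem_reverse, List.getElem_take]
      congr 1; simp; omega
    have e2 : (g.drop j)[k]'(by simp [List.length_zip] at hk ⊢; omega) = g[j + k]'(by omega) := by
      rw [List.getElem_drop]
    rw [e1, e2]
    exact this.symm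

theorem filtered_eq (g : List (List Char)) :
    (get_line_sym g).filter (fun a => is_perfect g a) = perfect_syms g := by
  rw [get_line_sym, PySem.List.foldl_append_ite_eq_filter, perfect_syms]
  simp only [List.nil_append, List.filter_filter]
  apply List.filter_congr
  intro i hi
  have hmem := (PySem.List.mem_pyRange_one).mp hi
  obtain ⟨h1, h2⟩ := hmem
  have hj : i = ((i.toNat : Nat) : Int) := by omega
  set j := i.toNat with hjdef
  have hj1 : 1 ≤ j := by omega
  have hj2 : j < g.length := by omega
  rw [hj]
  have hkey := key g j hj1 hj2
  have hb := beq_iff g j hj1 hj2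
  by_cases hA : (pvRow g (j : Int) = pvRow g ((j : Int) - 1)) ∧ is_perfect g (j : Int) = true
  · rw [hb.mpr (hkey.mp hA), hA.2]
    simp [hA.1]
  · have hBfalse : (((PySem.List.slice g none (some (j : Int))).reverse.zip (PySem.List.slice g (some (j : Int)) none)).all (fun p => decide (p.1 = p.2))) = false := by
      rw [← Bool.not_eq_true]
      exact fun hBt => hA (hkey.mpr (hb.mp hBt))
    rw [hBfalse]
    cases hIP : is_perfect g (j : Int) with
    | false => simp
    | true =>
      have hc : ¬ (pvRow g (j : Int) = pvRow g ((j : Int) - 1)) := fun hc => hA ⟨hc, hIP⟩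
      simp [hc]

-- ===== VERDICT (by name: the statement is the Claim_ definition above) =====
theorem process_pattern_spec : Claim_equal_process_pattern := by
  intro pattern exh exv _ _
  simp only [Spec_process_pattern, process_pattern, process_pattern_alt, transpose_eq,
    filtered_eq, zero_add]
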